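-- pv_equiv track=rewrite | github.com/csce3513-pied-piper/Math-Library | MathLibrary/functions.py | is_twisted_prime
-- ===== SOURCE A (Python) =====
-- def get_divisors(n:int):
--     divisors = []
--
--     if n == 0:
--         return [-1]
--
--     #Go through integers up to the multiplicative midpoint, which is the square root. Add divisors in pairs
--     for i in range(1, (int) (n ** .5 + 1)):
--         if(n % i == 0):
--             divisors.append(i)
--
--             #Add paired divisor if it is not the square root
--             if not (n / i == i):
--                 divisors.append((int)(n/i))
--
--     return divisors
--
-- def is_twisted_prime(n:int):
--     #Number and its reverse must be prime
--     if not is_prime(n):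
--         return False
--
--     #Get reverse of number
--     reversed = 0
--     while n > 0:
--         dig = n % 10
--         n = n // 10
--         reversed = reversed * 10 + dig
--
--     if not is_prime(reversed):
--         return False
--     return True
--
-- def is_prime(x:int):
--     if x <= 0:
--         return False
--     if(len(get_divisors(x)) == 2):
--         return True
--     return False
-- ===== SOURCE B (Python) =====
-- def _is_prime_fast(x: int) -> bool:
--     # Early-exit trial division; no float sqrt, no divisor list.
--     if x < 2:
--         return False
--     i = 2
--     while i * i <= x:
--         if x % i == 0:
--             return False
--         i += 1
--     return True
--
-- def is_twisted_prime(n: int):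
--     if not _is_prime_fast(n):
--         return False
--     r = 0
--     m = n
--     while m > 0:
--         r = r * 10 + m % 10
--         m //= 10
--     return _is_prime_fast(r)
-- ===== Notes on version B (the rewrite author's own statement) =====
-- stated objective: simpler
-- what changed: Primality is decided by early-exit trial division (while i*i <= x) instead of materialising the full paired divisor list via a float sqrt bound and testing len == 2.
import Mathlib
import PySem

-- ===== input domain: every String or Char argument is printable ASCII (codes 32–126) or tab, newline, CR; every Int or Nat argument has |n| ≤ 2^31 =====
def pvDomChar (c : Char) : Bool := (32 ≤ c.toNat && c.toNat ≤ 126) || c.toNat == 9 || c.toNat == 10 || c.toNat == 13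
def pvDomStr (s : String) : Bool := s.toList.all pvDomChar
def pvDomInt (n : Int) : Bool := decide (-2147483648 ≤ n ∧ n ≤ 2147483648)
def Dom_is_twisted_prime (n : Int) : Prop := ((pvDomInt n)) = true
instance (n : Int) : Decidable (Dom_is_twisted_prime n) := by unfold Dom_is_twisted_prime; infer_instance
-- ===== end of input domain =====

-- ===== PORT A =====
-- B replaces A's divisor-list counting primality test by early-exit trial division (simpler, no list, no float).
-- int(n ** .5 + 1) in get_divisors: for 0 <= n <= 2^31 the float square root is exact enough that this
-- equals Nat.sqrt n + 1 (checked exhaustively near every square); get_divisors is only reached with n >= 1.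
def pvSqrtBound (n : Int) : Int := (n.toNat.sqrt : Int) + 1

-- one iteration of get_divisors' loop body; `n / i` is Python float division, exact (= floor division)
-- on the branch where n % i == 0 and i >= 1, so it is ported as floordiv.
def pvDivStep (n : Int) (divisors : List Int) (i : Int) : List Int :=
  if PySem.Int.mod n i == 0 then
    let divisors := divisors ++ [i]
    if !(PySem.Int.floordiv n i == i) then divisors ++ [PySem.Int.floordiv n i] else divisors
  else divisors

def get_divisors (n : Int) : List Int :=
  if n == 0 then [-1]
  else (PySem.List.pyRange 1 (pvSqrtBound n) 1).foldl (pvDivStep n) []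

def pvIsPrime (x : Int) : Bool :=
  if x <= 0 then false
  else if (get_divisors x).length == 2 then true
  else false

-- the `while n > 0` digit-reversal loop of A
def pvRev (n acc : Int) : Int :=
  if h : n > 0 then pvRev (PySem.Int.floordiv n 10) (acc * 10 + PySem.Int.mod n 10)
  else acc
termination_by n.toNat
decreasing_by
  rw [PySem.Int.floordiv_eq_ediv_of_pos (by omega : (0:Int) < 10)]
  omega

def is_twisted_prime (n : Int) : Bool :=
  if !(pvIsPrime n) then false
  else if !(pvIsPrime (pvRev n 0)) then false
  else true

-- ===== PORT B =====
-- the `while i * i <= x` early-exit trial-division loop of B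
def altTrial (x i : Int) : Bool :=
  if h : i * i <= x then
    if PySem.Int.mod x i == 0 then false
    else altTrial x (i + 1)
  else true
termination_by (x + 1 - i).toNat
decreasing_by
  have h1 : 2 * i - 1 ≤ x := by nlinarith [sq_nonneg (i - 1)]
  have h2 : (0:Int) ≤ x := by nlinarith [sq_nonneg i]
  omega

def altIsPrime (x : Int) : Bool :=
  if x < 2 then false else altTrial x 2

-- the `while m > 0` digit-reversal loop of B
def altRev (m r : Int) : Int :=
  if h : m > 0 then altRev (PySem.Int.floordiv m 10) (r * 10 + PySem.Int.mod m 10)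
  else r
termination_by m.toNat
decreasing_by
  rw [PySem.Int.floordiv_eq_ediv_of_pos (by omega : (0:Int) < 10)]
  omega

def is_twisted_prime_alt (n : Int) : Bool :=
  if !(altIsPrime n) then false
  else altIsPrime (altRev n 0)

-- ===== PRECONDITION & SPEC =====
def Spec_is_twisted_prime (n : Int) (out : Bool) : Prop := out = is_twisted_prime_alt n
instance (n : Int) (out : Bool) : Decidable (Spec_is_twisted_prime n out) := by unfold Spec_is_twisted_prime; infer_instance

-- ===== CLAIM (what is proved, stated in full; the proofs are below) =====
def Claim_equal_is_twisted_prime : Prop := ∀ (n : Int), Dom_is_twisted_prime n → Spec_is_twisted_prime n (is_twisted_prime n)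

-- ===== LEMMAS AND PROOFS =====

-- the two digit-reversal loops are the same recursion
theorem rev_eq (n acc : Int) : pvRev n acc = altRev n acc := by
  fun_induction pvRev n acc with
  | case1 n acc h ih => rw [altRev, dif_pos h]; exact ih
  | case2 n acc h => rw [altRev, dif_neg h]

-- altTrial x i says: no j with i <= j and j * j <= x divides x
theorem altTrial_iff (x i : Int) (hi : 1 ≤ i) :
    altTrial x i = true ↔ ∀ j : Int, i ≤ j → j * j ≤ x → PySem.Int.mod x j ≠ 0 := by
  fun_induction altTrial x i with
  | case1 i h hdvd =>
    constructor
    · intro hff; simp at hff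
    · intro H; exact absurd (by simpa using hdvd) (H i le_rfl h)
  | case2 i h hdvd ih =>
    rw [ih (by omega)]
    constructor
    · intro H j hij hjx
      rcases eq_or_lt_of_le hij with rfl | hlt
      · simpa using hdvd
      · exact H j (by omega) hjx
    · intro H j hij hjx
      exact H j (by omega) hjx
  | case3 i h =>
    refine ⟨fun _ => ?_, fun _ => rfl⟩
    intro j hij hjx hdvd
    have hsq : i * i ≤ j * j := mul_le_mul hij hij (by omega) (by omega)
    linarith

-- each step of A's fold can only append
theorem divStep_len_le (n : Int) (acc : List Int) (i : Int) :
    acc.length ≤ (pvDivStep n acc i).length := by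
  unfold pvDivStep
  split_ifs <;> simp

theorem foldl_divStep_len_le (n : Int) (L : List Int) (acc : List Int) :
    acc.length ≤ (L.foldl (pvDivStep n) acc).length := by
  induction L generalizing acc with
  | nil => simp
  | cons j L ih => exact le_trans (divStep_len_le n acc j) (ih _)

-- A's fold leaves the accumulator length unchanged iff no element of the range divides n
theorem foldl_divStep_len_eq_iff (n : Int) (L : List Int) (acc : List Int) :
    (L.foldl (pvDivStep n) acc).length = acc.length ↔
      ∀ j ∈ L, PySem.Int.mod n j ≠ 0 := by
  induction L generalizing acc with
  | nil => simp
  | cons j L ih =>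
    simp only [List.foldl_cons, List.mem_cons]
    by_cases hj : PySem.Int.mod n j = 0
    · have hgrow : acc.length + 1 ≤ (pvDivStep n acc j).length := by
        unfold pvDivStep
        rw [if_pos (by simp [hj])]
        split_ifs <;> simp
      have := foldl_divStep_len_le n L (pvDivStep n acc j)
      constructor
      · intro h; omega
      · intro h; exact absurd hj (h j (Or.inl rfl))
    · have hstep : pvDivStep n acc j = acc := by unfold pvDivStep; simp [hj]
      rw [hstep, ih]
      constructor
      · intro h k hk
        rcases hk with rfl | hk
        · exact hj
        · exact h k hk
      · intro h k hk; exact h k (Or.inr hk)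

-- for j >= 1, j <= isqrt x  <->  j * j <= x  (x >= 0)
theorem le_sqrt_iff (x j : Int) (hx : 0 ≤ x) (hj : 1 ≤ j) :
    j ≤ (x.toNat.sqrt : Int) ↔ j * j ≤ x := by
  have hxe : ((x.toNat : Nat) : Int) = x := Int.toNat_of_nonneg hx
  have hje : ((j.toNat : Nat) : Int) = j := Int.toNat_of_nonneg (by omega)
  constructor
  · intro h
    have h1 : j.toNat ≤ x.toNat.sqrt := by omega
    have h2 : ((j.toNat * j.toNat : Nat) : Int) ≤ ((x.toNat : Nat) : Int) :=
      by exact_mod_cast Nat.le_sqrt.mp h1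
    push_cast at h2
    rw [hje, hxe] at h2
    exact h2
  · intro h
    have h1 : j.toNat * j.toNat ≤ x.toNat := by
      have h2 : ((j.toNat * j.toNat : Nat) : Int) ≤ ((x.toNat : Nat) : Int) := by
        push_cast
        rw [hje, hxe]
        exact h
      exact_mod_cast h2
    have := Nat.le_sqrt.mpr h1
    omega

-- the core: both primality tests agree on every integer
theorem prime_eq (x : Int) : pvIsPrime x = altIsPrime x := by
  rcases lt_trichotomy x 1 with hx | hx | hx
  · unfold pvIsPrime altIsPrime
    rw [if_pos (by omega : x ≤ 0), if_pos (by omega : x < 2)]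
  · subst hx; decide
  · -- x >= 2
    have hs1 : 1 ≤ (x.toNat.sqrt : Int) := by
      have : 1 ≤ x.toNat.sqrt := Nat.le_sqrt.mpr (by omega)
      omega
    unfold pvIsPrime altIsPrime get_divisors pvSqrtBound
    rw [if_neg (by omega : ¬ x ≤ 0), if_neg (by omega : ¬ x < 2),
        if_neg (by simp; omega : ¬ (x == 0) = true)]
    rw [PySem.List.pyRange_one_cons (by omega)]
    have hstep1 : pvDivStep x [] 1 = [1, x] := by
      unfold pvDivStep
      have hd : PySem.Int.floordiv x 1 = x := by
        rw [PySem.Int.floordiv_eq_ediv_of_pos (by omega)]; simp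
      rw [if_pos (by simp), hd]
      rw [if_pos (by simp; omega)]
      rfl
    rw [List.foldl_cons, hstep1, Bool.eq_iff_iff, altTrial_iff x 2 (by omega)]
    have hL := foldl_divStep_len_eq_iff x
      (PySem.List.pyRange (1 + 1) ((x.toNat.sqrt : Int) + 1)) [1, x]
    simp only [List.length_cons, List.length_nil, Nat.zero_add] at hL
    have hRange : (∀ j ∈ PySem.List.pyRange (1 + 1) ((x.toNat.sqrt : Int) + 1),
        PySem.Int.mod x j ≠ 0) ↔
        (∀ j : Int, 2 ≤ j → j * j ≤ x → PySem.Int.mod x j ≠ 0) := by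
      constructor
      · intro H j h2j hjx
        refine H j ?_
        rw [PySem.List.mem_pyRange_one]
        have := (le_sqrt_iff x j (by omega) (by omega)).mpr hjx
        omega
      · intro H j hmem
        rw [PySem.List.mem_pyRange_one] at hmem
        refine H j (by omega) ?_
        exact (le_sqrt_iff x j (by omega) (by omega)).mp (by omega)
    by_cases hc : (List.foldl (pvDivStep x) [1, x]
        (PySem.List.pyRange (1 + 1) ((x.toNat.sqrt : Int) + 1))).length = 2
    · rw [if_pos (by simpa using hc)]
      exact ⟨fun _ => hRange.mp (hL.mp hc), fun _ => rfl⟩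
    · rw [if_neg (by simpa using hc)]
      constructor
      · intro hff; simp at hff
      · intro HP; exact absurd (hL.mpr (hRange.mpr HP)) hc

-- ===== VERDICT (by name: the statement is the Claim_ definition above) =====
theorem is_twisted_prime_spec : Claim_equal_is_twisted_prime := by
  intro n _
  unfold Spec_is_twisted_prime is_twisted_prime is_twisted_prime_alt
  rw [prime_eq, rev_eq, prime_eq]
  by_cases h : altIsPrime n = true
  · simp [h]
  · simp [h]
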